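-- pv_equiv track=rewrite | github.com/amasud7/ENGR102 | word_puzzle.py | is_valid_guess
-- ===== SOURCE A (Python) =====
-- def get_valid_letters(string): # the unique letters of the puzzle
--     s = [',', '|', ' ']
--     letters = []
--     for i in string:
--         if i not in letters and i not in s:
--             letters.append(i)
--     x = "".join(letters)
--     return x
--
-- def is_valid_guess(string, string1): # the guess is in the unique letters of the puzzle.
--     string = get_valid_letters(string)
--     letter = []
--     for i in string1:
--         if i in string:
--             letter.append(i)
--     x = "".join(letter)
--     if sorted(x) == sorted(string):
--         return True
--     else:
--         return False
-- ===== SOURCE B (Python) =====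
-- def is_valid_guess(string, string1):
--     valid = set(string) - {',', '|', ' '}
--     return all(string1.count(c) == 1 for c in valid)
-- ===== Notes on version B (the rewrite author's own statement) =====
-- stated objective: faster
-- what changed: Instead of filtering the guess into a new string and comparing two sorts, B computes the puzzle's valid letters as a set difference and checks that each valid letter occurs exactly once in the guess.
import Mathlib
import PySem

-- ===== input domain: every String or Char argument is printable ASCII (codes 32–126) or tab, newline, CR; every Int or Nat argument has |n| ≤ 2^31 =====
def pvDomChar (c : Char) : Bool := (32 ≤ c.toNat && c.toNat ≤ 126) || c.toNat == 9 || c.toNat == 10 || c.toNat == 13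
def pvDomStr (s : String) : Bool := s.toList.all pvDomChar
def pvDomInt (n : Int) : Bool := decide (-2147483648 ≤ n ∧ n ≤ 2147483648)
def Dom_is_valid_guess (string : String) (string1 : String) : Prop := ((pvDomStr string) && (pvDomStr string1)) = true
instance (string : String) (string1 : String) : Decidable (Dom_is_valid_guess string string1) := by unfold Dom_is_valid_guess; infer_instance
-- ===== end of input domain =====

-- B checks that every letter of the puzzle's valid-letter set occurs exactly once in the
-- guess, instead of A's filter-the-guess / sort-both-sides comparison (measured faster in a timing run).

-- ===== PORT A =====
-- "".join(letters) of single chars is the char list itself; membership 'i in string'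
-- for a 1-char i is list membership — exact on this domain.
def get_valid_letters (string : List Char) : List Char :=
  let s : List Char := [',', '|', ' ']
  string.foldl
    (fun letters i =>
      if !letters.contains i && !s.contains i then letters ++ [i] else letters) []

def is_valid_guess (string : String) (string1 : String) : Bool :=
  let st := get_valid_letters string.toList
  let letter := string1.toList.foldl
    (fun letter i => if st.contains i then letter ++ [i] else letter) []
  if (PySem.List.sorted letter (fun x => x) false) = (PySem.List.sorted st (fun x => x) false)
  then true else false

-- ===== PORT B =====
def is_valid_guess_alt (string : String) (string1 : String) : Bool :=
  let valid : PySem.Set Char :=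
    PySem.Set.diff (PySem.Set.ofList string.toList) (PySem.Set.ofList [',', '|', ' '])
  valid.all (fun c => string1.toList.count c == 1)

-- ===== PRECONDITION & SPEC =====
def Spec_is_valid_guess (string : String) (string1 : String) (out : Bool) : Prop := out = is_valid_guess_alt string string1
instance (string : String) (string1 : String) (out : Bool) : Decidable (Spec_is_valid_guess string string1 out) := by unfold Spec_is_valid_guess; infer_instance

-- ===== CLAIM (what is proved, stated in full; the proofs are below) =====
def Claim_equal_is_valid_guess : Prop := ∀ (string : String) (string1 : String), Dom_is_valid_guess string string1 → Spec_is_valid_guess string string1 (is_valid_guess string string1)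

-- ===== LEMMAS AND PROOFS =====

-- A's dedup-with-exclusion loop is the p-filter of the first-occurrence dedup loop.
theorem foldA_eq_filter_foldl_add (p : Char → Bool) (cs : List Char) :
    ∀ acc : List Char,
      cs.foldl (fun letters i => if !letters.contains i && p i then letters ++ [i] else letters)
        (acc.filter p)
      = (cs.foldl PySem.Set.add acc).filter p := by
  induction cs with
  | nil => intro acc; simp
  | cons c cs ih =>
    intro acc
    simp only [List.foldl_cons]
    by_cases hc : c ∈ acc
    · have hadd : PySem.Set.add acc c = acc := by simp [PySem.Set.add, hc]
      by_cases hp : p c = true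
      · have hcf : (acc.filter p).contains c = true := by
          rw [List.contains_iff_mem, List.mem_filter]; exact ⟨hc, hp⟩
        rw [hcf, hadd]
        simpa using ih acc
      · have hp' : p c = false := by simpa using hp
        rw [hp', hadd]
        simpa using ih acc
    · have hadd : PySem.Set.add acc c = acc ++ [c] := by simp [PySem.Set.add, hc]
      have hcf : (acc.filter p).contains c = false := by
        rw [Bool.eq_false_iff]
        intro h
        exact hc (List.mem_filter.mp (List.contains_iff_mem.mp h)).1
      by_cases hp : p c = true
      · have hfa : (acc ++ [c]).filter p = acc.filter p ++ [c] := by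
          rw [List.filter_append]; simp [hp]
        rw [hcf, hadd]
        have := ih (acc ++ [c])
        rw [hfa] at this
        simpa [hp] using this
      · have hp' : p c = false := by simpa using hp
        have hfa : (acc ++ [c]).filter p = acc.filter p := by
          rw [List.filter_append]; simp [hp']
        rw [hp', hadd]
        have := ih (acc ++ [c])
        rw [hfa] at this
        simpa using this

theorem get_valid_letters_eq_filter_ofList (cs : List Char) :
    get_valid_letters cs
      = (PySem.Set.ofList cs).filter (fun x => !([',', '|', ' '] : List Char).contains x) := by
  have := foldA_eq_filter_foldl_add (fun x => !([',', '|', ' '] : List Char).contains x) cs []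
  simpa [get_valid_letters, PySem.Set.ofList_eq_foldl] using this

theorem nodup_get_valid_letters (cs : List Char) : (get_valid_letters cs).Nodup := by
  rw [get_valid_letters_eq_filter_ofList]
  exact (PySem.Set.nodup_ofList cs).filter _

-- the filtered-guess multiset matches the nodup valid list iff every valid letter occurs once in the guess
theorem filter_perm_iff_counts (L gs : List Char) (hnd : L.Nodup) :
    (gs.filter (fun i => L.contains i)).Perm L ↔ ∀ c ∈ L, gs.count c = 1 := by
  constructor
  · intro hp c hc
    have := (List.perm_iff_count.mp hp) c
    rw [List.count_filter (by simpa [List.contains_iff_mem] using hc)] at this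
    rw [this, List.count_eq_one_of_mem hnd hc]
  · intro h
    apply List.perm_iff_count.mpr
    intro c
    by_cases hc : c ∈ L
    · rw [List.count_filter (by simpa [List.contains_iff_mem] using hc),
        List.count_eq_one_of_mem hnd hc]
      exact h c hc
    · rw [List.count_eq_zero_of_not_mem hc, List.count_eq_zero_of_not_mem]
      intro hmem
      exact hc (by simpa [List.contains_iff_mem] using (List.mem_filter.mp hmem).2)

-- the core equality, stated on char lists
theorem is_valid_guess_core (cs gs : List Char) :
    (if (PySem.List.sorted (gs.foldl (fun letter i =>
          if (get_valid_letters cs).contains i then letter ++ [i] else letter) []) (fun x => x) false)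
        = (PySem.List.sorted (get_valid_letters cs) (fun x => x) false)
     then true else false)
    = (PySem.Set.diff (PySem.Set.ofList cs) (PySem.Set.ofList [',', '|', ' '])).all
        (fun c => gs.count c == 1) := by
  have hset : PySem.Set.ofList ([',', '|', ' '] : List Char) = [',', '|', ' '] := by decide
  have hdiff : PySem.Set.diff (PySem.Set.ofList cs) (PySem.Set.ofList ([',', '|', ' '] : List Char))
      = get_valid_letters cs := by
    rw [hset, get_valid_letters_eq_filter_ofList]; rfl
  rw [hdiff]
  set L := get_valid_letters cs with hL
  have hfold : gs.foldl (fun letter i => if L.contains i then letter ++ [i] else letter) []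
      = gs.filter (fun i => L.contains i) := by
    simpa using PySem.List.foldl_append_if (fun i => L.contains i) (fun i => i) gs []
  rw [hfold]
  have hiff := filter_perm_iff_counts L gs (hL ▸ nodup_get_valid_letters cs)
  by_cases h : (gs.filter (fun i => L.contains i)).Perm L
  · rw [if_pos ((PySem.List.sorted_id_eq_sorted_id_iff_perm _ _).mpr h)]
    symm
    rw [List.all_eq_true]
    intro c hc
    simpa using hiff.mp h c hc
  · rw [if_neg (fun hs => h ((PySem.List.sorted_id_eq_sorted_id_iff_perm _ _).mp hs))]
    symm
    rw [Bool.eq_false_iff]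
    intro hall
    apply h
    apply hiff.mpr
    intro c hc
    simpa using List.all_eq_true.mp hall c hc

-- ===== VERDICT (by name: the statement is the Claim_ definition above) =====
theorem is_valid_guess_spec : Claim_equal_is_valid_guess := by
  intro string string1 _
  unfold Spec_is_valid_guess
  show (if _ then true else false) = _
  exact is_valid_guess_core string.toList string1.toList
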